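-- pv_equiv track=rewrite | github.com/grig95/ZuCo2.0-processing | eeg_plotter.py | device_channel_to_data_channel
-- ===== SOURCE A (Python) =====
-- MISSING_CHANNELS = [126, 127, 48, 119, 17, 128, 49, 56, 63, 68, 73, 81, 88, 94, 99, 107, 113, 125, 21, 25, 32, 1, 8, 14] #ISSUE: 24 elements instead of the 23 stated in the paper
--
-- def device_channel_to_data_channel(index):
--     '''
--     Takes an index between 1 and 128 corresponding to one of the channels of the GSN-HydroCel-128 system and returns  its corresponding index in the data (0-104).
--     '''
--     if index in MISSING_CHANNELS:
--         return None
--     c = 0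
--     for miss in MISSING_CHANNELS:
--         if miss < index:
--             c+=1
--     return index-c-1
-- ===== SOURCE B (Python) =====
-- MISSING_CHANNELS = [126, 127, 48, 119, 17, 128, 49, 56, 63, 68, 73, 81, 88, 94, 99, 107, 113, 125, 21, 25, 32, 1, 8, 14]
--
-- SORTED_MISSING = sorted(MISSING_CHANNELS)
--
-- def _bisect_left(a, x):
--     lo, hi = 0, len(a)
--     while lo < hi:
--         mid = (lo + hi) // 2
--         if a[mid] < x:
--             lo = mid + 1
--         else:
--             hi = mid
--     return lo
--
-- def device_channel_to_data_channel(index):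
--     if index in MISSING_CHANNELS:
--         return None
--     return index - _bisect_left(SORTED_MISSING, index) - 1
-- ===== Notes on version B (the rewrite author's own statement) =====
-- stated objective: idiomatic
-- what changed: Replaces the linear counting loop over MISSING_CHANNELS with a binary search (bisect_left) over a module-level sorted copy of the list; the count of missing channels below the index becomes the insertion point.
import Mathlib
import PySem

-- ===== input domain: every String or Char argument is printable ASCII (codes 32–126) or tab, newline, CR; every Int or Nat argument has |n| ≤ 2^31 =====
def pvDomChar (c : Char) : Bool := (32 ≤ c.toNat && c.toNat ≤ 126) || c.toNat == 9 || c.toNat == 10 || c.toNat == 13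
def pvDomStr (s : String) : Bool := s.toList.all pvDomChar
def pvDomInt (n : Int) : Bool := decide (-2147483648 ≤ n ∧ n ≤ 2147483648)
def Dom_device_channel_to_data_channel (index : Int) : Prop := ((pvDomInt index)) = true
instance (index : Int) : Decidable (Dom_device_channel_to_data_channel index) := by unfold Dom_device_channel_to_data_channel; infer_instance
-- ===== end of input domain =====

-- B replaces A's linear counting loop with a binary search over a sorted copy of the missing-channel list (more idiomatic; same result).

-- ===== PORT A =====
def MISSING_CHANNELS : List Int := [126, 127, 48, 119, 17, 128, 49, 56, 63, 68, 73, 81, 88, 94, 99, 107, 113, 125, 21, 25, 32, 1, 8, 14]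

def device_channel_to_data_channel (index : Int) : Option Int :=
  if index ∈ MISSING_CHANNELS then none
  else
    let c : Int := MISSING_CHANNELS.foldl (fun c miss => if miss < index then c + 1 else c) 0
    some (index - c - 1)

-- ===== PORT B =====
def SORTED_MISSING : List Int := PySem.List.sorted MISSING_CHANNELS (fun x => x) false

-- literal port of Source B's hand-written while loop (lo, hi), mid = (lo+hi)//2
def bisectLeftLoop (a : List Int) (x : Int) (lo hi : Nat) : Nat :=
  if _h : lo < hi then
    let mid := (lo + hi) / 2
    if a.getD mid 0 < x then bisectLeftLoop a x (mid + 1) hi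
    else bisectLeftLoop a x lo mid
  else lo
termination_by hi - lo
decreasing_by all_goals omega

def device_channel_to_data_channel_alt (index : Int) : Option Int :=
  if index ∈ MISSING_CHANNELS then none
  else some (index - (bisectLeftLoop SORTED_MISSING index 0 SORTED_MISSING.length : Int) - 1)

-- ===== PRECONDITION & SPEC =====
def Spec_device_channel_to_data_channel (index : Int) (out : Option Int) : Prop := out = device_channel_to_data_channel_alt index
instance (index : Int) (out : Option Int) : Decidable (Spec_device_channel_to_data_channel index out) := by unfold Spec_device_channel_to_data_channel; infer_instance

-- ===== CLAIM (what is proved, stated in full; the proofs are below) =====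
def Claim_equal_device_channel_to_data_channel : Prop := ∀ (index : Int), Dom_device_channel_to_data_channel index → Spec_device_channel_to_data_channel index (device_channel_to_data_channel index)

-- ===== LEMMAS AND PROOFS =====

-- Binary-search invariant: starting from a window [lo, hi) whose outside is already decided,
-- the loop returns a split point r with everything below r strictly < x and everything at/above r ≥ x.
lemma bisectLeftLoop_spec (S : List Int) (x : Int) (hs : S.Pairwise (· ≤ ·)) :
    ∀ n lo hi, hi - lo ≤ n → lo ≤ hi → hi ≤ S.length →
      (∀ j (hj : j < S.length), j < lo → S[j] < x) →
      (∀ j (hj : j < S.length), hi ≤ j → x ≤ S[j]) →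
      bisectLeftLoop S x lo hi ≤ S.length ∧
      (∀ j (hj : j < S.length), j < bisectLeftLoop S x lo hi → S[j] < x) ∧
      (∀ j (hj : j < S.length), bisectLeftLoop S x lo hi ≤ j → x ≤ S[j]) := by
  intro n
  induction n with
  | zero =>
    intro lo hi hn hlh hhl h1 h2
    have heq : lo = hi := by omega
    rw [bisectLeftLoop]
    simp only [show ¬ lo < hi by omega, dite_false]
    exact ⟨by omega, h1, fun j hj hle => h2 j hj (by omega)⟩
  | succ n ih =>
    intro lo hi hn hlh hhl h1 h2
    rw [bisectLeftLoop]
    by_cases h : lo < hi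
    · simp only [h, dite_true]
      have hmid : (lo + hi) / 2 < S.length := by omega
      rw [List.getD_eq_getElem S 0 hmid]
      by_cases hc : S[(lo + hi) / 2] < x
      · simp only [hc, if_true]
        apply ih ((lo + hi) / 2 + 1) hi (by omega) (by omega) hhl
        · intro j hj hjl
          rcases Nat.lt_or_ge j ((lo + hi) / 2) with hj2 | hj2
          · rcases Nat.lt_or_ge j lo with hj3 | hj3
            · exact h1 j hj hj3
            · calc S[j] ≤ S[(lo + hi) / 2] :=
                    List.pairwise_iff_getElem.mp hs j ((lo + hi) / 2) hj hmid hj2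
                _ < x := hc
          · have : j = (lo + hi) / 2 := by omega
            subst this; exact hc
        · exact h2
      · simp only [hc, if_false]
        apply ih lo ((lo + hi) / 2) (by omega) (by omega) (by omega) h1
        intro j hj hjge
        rcases Nat.lt_or_ge j hi with hj2 | hj2
        · rcases Nat.eq_or_lt_of_le hjge with hj3 | hj3
          · subst hj3; omega
          · calc x ≤ S[(lo + hi) / 2] := by omega
              _ ≤ S[j] := List.pairwise_iff_getElem.mp hs ((lo + hi) / 2) j hmid hj hj3
        · exact h2 j hj hj2
    · simp only [h, dite_false]
      exact ⟨by omega, h1, fun j hj hle => h2 j hj (by omega)⟩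

-- A split point determines the count of elements below x.
lemma countP_eq_split (S : List Int) (x : Int) (r : Nat) (hr : r ≤ S.length)
    (h1 : ∀ j (hj : j < S.length), j < r → S[j] < x)
    (h2 : ∀ j (hj : j < S.length), r ≤ j → x ≤ S[j]) :
    S.countP (fun v => decide (v < x)) = r := by
  conv_lhs => rw [← List.take_append_drop r S]
  rw [List.countP_append]
  have htake : (S.take r).countP (fun v => decide (v < x)) = (S.take r).length := by
    apply List.countP_eq_length.mpr
    intro a ha
    rcases List.mem_iff_getElem.mp ha with ⟨i, hi, hia⟩
    have hi' : i < S.length := by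
      have := hi; simp [List.length_take] at this; omega
    rw [List.getElem_take] at hia
    simpa [← hia] using h1 i hi' (by have := hi; simp [List.length_take] at this; omega)
  have hdrop : (S.drop r).countP (fun v => decide (v < x)) = 0 := by
    apply List.countP_eq_zero.mpr
    intro a ha
    rcases List.mem_iff_getElem.mp ha with ⟨i, hi, hia⟩
    have hi' : r + i < S.length := by
      have := hi; simp [List.length_drop] at this; omega
    rw [List.getElem_drop] at hia
    have := h2 (r + i) hi' (by omega)
    simp [← hia]; omega
  rw [htake, hdrop, List.length_take]
  omega

lemma count_eq_bisect (x : Int) :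
    MISSING_CHANNELS.countP (fun v => decide (v < x)) =
      bisectLeftLoop SORTED_MISSING x 0 SORTED_MISSING.length := by
  have hs : SORTED_MISSING.Pairwise (· ≤ ·) :=
    PySem.List.sorted_pairwise MISSING_CHANNELS (fun x => x) 
  have hspec := bisectLeftLoop_spec SORTED_MISSING x hs SORTED_MISSING.length 0
    SORTED_MISSING.length (by omega) (by omega) (le_refl _)
    (by intro j hj hjl; omega) (by intro j hj hjl; omega)
  have hcount := countP_eq_split SORTED_MISSING x _ hspec.1 hspec.2.1 hspec.2.2
  rw [← hcount]
  exact ((PySem.List.sorted_perm MISSING_CHANNELS (fun x => x) false).countP_eq _).symm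

-- ===== VERDICT (by name: the statement is the Claim_ definition above) =====
theorem device_channel_to_data_channel_spec : Claim_equal_device_channel_to_data_channel := by
  intro index _
  unfold Spec_device_channel_to_data_channel device_channel_to_data_channel device_channel_to_data_channel_alt
  by_cases hm : index ∈ MISSING_CHANNELS
  · simp [hm]
  · simp only [hm, if_false]
    rw [PySem.List.foldl_ite_add_one (fun miss => miss < index)]
    rw [count_eq_bisect index]
    simp
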